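-- pv_equiv track=rewrite | github.com/Roshannarma/Python_Github | sudokoFinal/solver.py | basic_check
-- ===== SOURCE A (Python) =====
-- def basic_check(full_list):
--     single,multiple = [],[]
--     for y in full_list:
--         if len(y)==1:
--             single.append(y)
--         else:
--             multiple.append(y)
--     for i,number in enumerate(full_list):
--         if number not in single:
--             for check in single:
--                 if check in number:
--                     location = number.index(check)
--                     number = number[0:location] + number[location+1:]
--                     full_list[i] = number
--     return full_list
-- ===== SOURCE B (Python) =====
-- def basic_check(full_list):
--     # Count the single-candidate values once.
--     counts = {}
--     for cell in full_list:
--         if len(cell) == 1: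
--             counts[cell] = counts.get(cell, 0) + 1
--     out = []
--     for cell in full_list:
--         if len(cell) == 1:
--             out.append(cell)
--         else:
--             budget = dict(counts)
--             kept = []
--             for ch in cell:
--                 if budget.get(ch, 0) > 0:
--                     budget[ch] = budget[ch] - 1
--                 else:
--                     kept.append(ch)
--             out.append(''.join(kept))
--     full_list[:] = out
--     return full_list
-- ===== Notes on version B (the rewrite author's own statement) =====
-- stated objective: faster
-- what changed: A scans the singles list per cell, testing 'number not in single' (O(n) scan) and re-searching/re-slicing the string once per single; B builds a counter of the single values in one pass and rebuilds each multi-candidate cell in a single left-to-right scan, dropping each character while its counter budget lasts.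
import Mathlib
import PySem

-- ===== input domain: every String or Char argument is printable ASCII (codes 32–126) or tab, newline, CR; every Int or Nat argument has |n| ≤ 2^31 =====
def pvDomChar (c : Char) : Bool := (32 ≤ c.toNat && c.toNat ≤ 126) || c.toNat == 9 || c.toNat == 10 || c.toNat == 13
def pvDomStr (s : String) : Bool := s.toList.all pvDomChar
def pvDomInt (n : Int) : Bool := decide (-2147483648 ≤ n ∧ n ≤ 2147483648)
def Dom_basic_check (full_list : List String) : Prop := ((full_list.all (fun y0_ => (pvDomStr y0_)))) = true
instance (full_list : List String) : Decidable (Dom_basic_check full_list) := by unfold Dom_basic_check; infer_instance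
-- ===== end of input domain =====

-- B replaces A's quadratic inner loop over the singles (substring test + index + two slices per single,
-- per cell) by one left-to-right scan of each cell against a per-cell copy of a counter of the single
-- values used as a removal budget.  Both Pythons mutate full_list in place identically (A writes cells
-- back by index, B assigns full_list[:]); the theorems are about the returned value.

-- ===== PORT A =====
-- 'if check in number: location = number.index(check); number = number[0:location] + number[location+1:]'

def pyStepChk (number check : String) : String :=
  if PySem.Str.isIn check number then
    let location := PySem.Str.find number check
    PySem.Str.slice number (some 0) (some location) ++ PySem.Str.slice number (some (location + 1)) none
  else number


-- body of the outer loop for one cell: 'if number not in single: for check in single: ...'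
def pyStepCell (single : List String) (number : String) : String :=
  if number ∈ single then number else single.foldl pyStepChk number


-- 'for i, number in enumerate(full_list)' writing full_list[i]: only index i is read/written at step i
def pyLoopA (single : List String) (l : List String) (i : Nat) : List String :=
  if h : i < l.length then pyLoopA single (l.set i (pyStepCell single l[i])) (i + 1) else l
  termination_by l.length - i
  decreasing_by simp only [List.length_set]; omega


def pySingles (full_list : List String) : List String × List String :=
  full_list.foldl
    (fun (p : List String × List String) y =>
      if PySem.Str.len y == 1 then (p.1 ++ [y], p.2) else (p.1, p.2 ++ [y])) ([], [])


def basic_check (full_list : List String) : List String :=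
  pyLoopA (pySingles full_list).1 full_list 0

-- B's first pass: counts = {} ; counts[cell] = counts.get(cell, 0) + 1 for the len-1 cells


-- ===== PORT B =====

-- one step of B's scan: drop the char while its budget lasts, else keep it
def altScanStep (st : PySem.Dict String Int × List Char) (ch : Char) :
    PySem.Dict String Int × List Char :=
  let k := String.ofList [ch]
  if st.1.getD k 0 > 0 then (st.1.insert k (st.1.getD k 0 - 1), st.2) else (st.1, st.2 ++ [ch])


def altCounts (full_list : List String) : PySem.Dict String Int :=
  full_list.foldl
    (fun d cell => if PySem.Str.len cell == 1 then d.insert cell (d.getD cell 0 + 1) else d)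
    PySem.Dict.empty


def basic_check_alt (full_list : List String) : List String :=
  full_list.foldl
    (fun out cell =>
      if PySem.Str.len cell == 1 then out ++ [cell]
      else out ++ [String.ofList (cell.toList.foldl altScanStep (altCounts full_list, [])).2]) []


-- ===== PRECONDITION & SPEC =====
def Spec_basic_check (full_list : List String) (out : List String) : Prop := out = basic_check_alt full_list
instance (full_list : List String) (out : List String) : Decidable (Spec_basic_check full_list out) := by unfold Spec_basic_check; infer_instance

-- ===== CLAIM (what is proved, stated in full; the proofs are below) =====
def Claim_equal_basic_check : Prop := ∀ (full_list : List String), Dom_basic_check full_list → Spec_basic_check full_list (basic_check full_list)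

-- ===== LEMMAS AND PROOFS =====


-- pure form of B's scan: the budget as a function Char → Int
def scanF (bf : Char → Int) : List Char → List Char
  | [] => []
  | a :: t => if bf a > 0 then scanF (fun x => if x = a then bf a - 1 else bf x) t else a :: scanF bf t


-- pure form of A's inner loop: erase the first occurrence of each single value, in order
def remAll (s : List Char) (cs : List Char) : List Char := cs.foldl (fun s c => s.erase c) s


theorem scanF_nonpos (bf : Char → Int) (s : List Char) (h : ∀ x, bf x ≤ 0) : scanF bf s = s := by
  induction s with
  | nil => rfl
  | cons a t ih => simp [scanF, not_lt.mpr (h a), ih]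


-- raising the budget of c by one drops exactly one more (the first remaining) occurrence of c
theorem scanF_bump (bf : Char → Int) (c : Char) (s : List Char) (h : ∀ x, 0 ≤ bf x) :
    scanF (fun x => if x = c then bf c + 1 else bf x) s = scanF bf (s.erase c) := by
  induction s generalizing bf with
  | nil => rfl
  | cons a t ih =>
    by_cases hac : a = c
    · subst hac
      rw [List.erase_cons_head]
      simp only [scanF]
      rw [if_pos (by simp; have := h a; omega)]
      congr 1
      funext x; by_cases hx : x = a <;> simp [hx]
    · rw [List.erase_cons_tail (by simp [hac])]
      simp only [scanF, if_neg hac]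
      by_cases hba : bf a > 0
      · rw [if_pos hba, if_pos hba]
        have he : (fun x => if x = a then bf a - 1 else if x = c then bf c + 1 else bf x)
            = (fun x => if x = c then (if (c : Char) = a then bf a - 1 else bf c) + 1 else
              (if x = a then bf a - 1 else bf x)) := by
          have hca : ¬ c = a := fun hh => hac hh.symm
          funext x
          by_cases hx : x = a <;> by_cases hxc : x = c <;> simp [hx, hxc, hac, hca]
        rw [he]
        exact ih _ (by intro x; by_cases hx : x = a <;> simp [hx] <;> [omega; exact h x])
      · rw [if_neg hba, if_neg hba]
        congr 1
        exact ih bf h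


theorem remAll_eq_scanF (cs s : List Char) : remAll s cs = scanF (fun x => (cs.count x : Int)) s := by
  induction cs generalizing s with
  | nil => exact (scanF_nonpos _ s (by simp)).symm
  | cons c cs ih =>
    show remAll (s.erase c) cs = _
    rw [ih]
    rw [← scanF_bump (fun x => (cs.count x : Int)) c s (fun x => Int.natCast_nonneg _)]
    congr 1
    funext x
    by_cases hx : x = c
    · simp [hx]
    · rw [if_neg hx, List.count_cons_of_ne (Ne.symm hx)]


theorem pv_erase_split : ∀ (k : Nat) (s t : List Char) (c : Char), s.drop k = c :: t →
    (∀ i, i < k → ¬ [c] <+: s.drop i) → s.erase c = s.take k ++ t := by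
  intro k
  induction k with
  | zero =>
    intro s t c h _
    simp only [List.drop_zero] at h
    subst h
    simp [List.erase_cons_head]
  | succ k ih =>
    intro s t c h hmin
    cases s with
    | nil => simp at h
    | cons a s' =>
      have ha : a ≠ c := by
        intro he
        exact hmin 0 (Nat.succ_pos _) (by subst he; exact ⟨s', rfl⟩)
      rw [List.erase_cons_tail (by simp [ha])]
      have := ih s' t c (by simpa using h) (fun i hi => hmin (i+1) (by omega))
      simp [List.take_succ_cons, this]


-- one step of A's inner loop is erasing the first occurrence of the single's character
theorem pv_stepChk_toList (x y : String) (c : Char) (hy : y.toList = [c]) :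
    (pyStepChk x y).toList = x.toList.erase c := by
  unfold pyStepChk
  by_cases hin : PySem.Str.isIn y x
  · rw [if_pos hin]
    have hinf : [c] <:+: x.toList := by
      have := (PySem.Str.isIn_iff_infix y x).mp hin
      rwa [hy] at this
    have hnn : 0 ≤ PySem.Str.find x y := by
      rw [PySem.Str.find_nonneg_iff, hy]; exact hinf
    have hfe : PySem.Str.find x y = PySem.Chars.find x.toList [c] := by
      simp [hy]
    set n : Int := PySem.Str.find x y with hn
    have hspec := PySem.Chars.find_spec (s := x.toList) (sub := [c]) (by rw [← hfe]; exact hnn)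
    rw [← hfe] at hspec
    obtain ⟨hpre, hmin⟩ := hspec
    obtain ⟨t, ht⟩ := hpre
    simp only [List.singleton_append] at ht
    have hsplit := pv_erase_split n.toNat x.toList t c ht.symm (fun i hi => hmin i hi)
    rw [hsplit]
    -- now compute the two slices
    simp only [String.toList_append]
    rw [PySem.Str.toList_slice, PySem.Str.toList_slice]
    simp only [PySem.Chars.slice_eq_listSlice]
    rw [PySem.List.slice_zero_start, PySem.List.slice_to x.toList hnn, PySem.List.slice_from x.toList (by omega : (0:Int) ≤ n + 1)]
    have h1 : ((n + 1).toNat) = n.toNat + 1 := by omega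
    rw [h1]
    congr 1
    -- x.toList.drop (n.toNat+1) = t
    have := congrArg (List.drop 1) ht.symm
    simpa [List.drop_drop, Nat.add_comm] using this
  · rw [if_neg hin]
    have : c ∉ x.toList := by
      intro hc
      apply hin
      rw [PySem.Str.isIn_iff_infix y x, hy]
      obtain ⟨p, q, hpq⟩ := List.append_of_mem hc
      exact ⟨p, q, by simp [hpq]⟩
    exact (List.erase_of_not_mem this).symm


theorem pv_foldl_stepChk (single : List String) (h : ∀ y ∈ single, y.toList.length = 1)
    (x : String) : (single.foldl pyStepChk x).toList = remAll x.toList (single.flatMap String.toList) := by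
  induction single generalizing x with
  | nil => simp [remAll]
  | cons y rest ih =>
    obtain ⟨c, hc⟩ := List.length_eq_one_iff.mp (h y (by simp))
    rw [List.foldl_cons, List.flatMap_cons, hc]
    have hrest : ∀ z ∈ rest, z.toList.length = 1 := fun z hz => h z (by simp [hz])
    rw [ih hrest]
    show remAll ((pyStepChk x y).toList) _ = remAll x.toList ([c] ++ rest.flatMap String.toList)
    rw [pv_stepChk_toList x y c hc]
    rfl


-- B's dict-backed scan computes scanF of the getD budget function
theorem pv_scan_fold (s : List Char) (d : PySem.Dict String Int) (kept : List Char) :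
    (s.foldl altScanStep (d, kept)).2 = kept ++ scanF (fun c => d.getD (String.ofList [c]) 0) s := by
  induction s generalizing d kept with
  | nil => simp [scanF]
  | cons a t ih =>
    rw [List.foldl_cons]
    by_cases hpos : d.getD (String.ofList [a]) 0 > 0
    · have hstep : altScanStep (d, kept) a
          = (d.insert (String.ofList [a]) (d.getD (String.ofList [a]) 0 - 1), kept) := by
        simp [altScanStep, hpos]
      rw [hstep, ih]
      have he : (fun c => (d.insert (String.ofList [a]) (d.getD (String.ofList [a]) 0 - 1)).getD
            (String.ofList [c]) 0)
          = (fun x => if x = a then (fun c => d.getD (String.ofList [c]) 0) a - 1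
              else (fun c => d.getD (String.ofList [c]) 0) x) := by
        funext x
        rw [PySem.Dict.getD_insert]
        by_cases hx : x = a
        · simp [hx]
        · rw [if_neg (fun hh => hx (by have := congrArg String.toList hh; simpa using this)), if_neg hx]
      rw [he]
      simp only [scanF, if_pos hpos]
    · have hstep : altScanStep (d, kept) a = (d, kept ++ [a]) := by
        simp only [altScanStep, if_neg hpos]
      rw [hstep, ih]
      simp only [scanF, if_neg hpos]
      simp


theorem pv_count_flatMap (single : List String) (h : ∀ y ∈ single, y.toList.length = 1) (c : Char) :
    ((single.flatMap String.toList).count c : Int) = (single.count (String.ofList [c]) : Int) := by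
  induction single with
  | nil => simp
  | cons y rest ih =>
    obtain ⟨d, hd⟩ := List.length_eq_one_iff.mp (h y (by simp))
    have hrest := ih (fun z hz => h z (by simp [hz]))
    rw [List.flatMap_cons, hd]
    by_cases hdc : d = c
    · subst hdc
      have hy : y = String.ofList [d] := by
        apply String.toList_inj.mp; simp [hd]
      rw [List.singleton_append, List.count_cons_self, hy, List.count_cons_self]
      push_cast; omega
    · have hy : y ≠ String.ofList [c] := by
        intro he; apply hdc
        have := congrArg String.toList he
        simp [hd] at this; exact this
      rw [List.singleton_append, List.count_cons_of_ne hdc, List.count_cons_of_ne hy]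
      exact hrest


-- A's index loop writes index i at step i only: it is a map
theorem pv_loopA_eq (single : List String) :
    ∀ (n : Nat) (l : List String) (i : Nat), l.length - i = n →
      pyLoopA single l i = l.take i ++ (l.drop i).map (pyStepCell single) := by
  intro n
  induction n with
  | zero =>
    intro l i hn
    have hle : l.length ≤ i := by omega
    rw [pyLoopA, dif_neg (by omega)]
    rw [List.drop_eq_nil_of_le hle, List.take_of_length_le hle]
    simp
  | succ m ih =>
    intro l i hn
    have hi : i < l.length := by omega
    rw [pyLoopA, dif_pos hi]
    set v := pyStepCell single l[i] with hv
    have := ih (l.set i v) (i + 1) (by simp; omega)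
    rw [this]
    have hset : l.set i v = l.take i ++ v :: l.drop (i + 1) := by
      rw [List.set_eq_take_append_cons_drop, if_pos hi]
    rw [hset]
    rw [List.take_append, List.drop_append]
    have hlt : (l.take i).length = i := List.length_take_of_le (by omega)
    rw [hlt]
    simp only [Nat.add_sub_cancel_left]
    rw [List.take_of_length_le (by omega : (l.take i).length ≤ i + 1)]
    rw [List.drop_eq_nil_of_le (by omega : (l.take i).length ≤ i + 1)]
    simp only [List.take_succ_cons, List.take_zero, List.drop_succ_cons, List.drop_zero, List.nil_append]
    rw [List.drop_eq_getElem_cons hi]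
    simp [hv]
    rw [List.drop_eq_getElem_cons (show i < (List.map (pyStepCell single) l).length by simpa using hi)]
    simp

-- 'for y in full_list: single.append('/'multiple.append' — the two accumulators of A's first loop


theorem pv_main (full_list : List String) : basic_check full_list = basic_check_alt full_list := by
  unfold basic_check basic_check_alt
  set P : String → Bool := fun y => PySem.Str.len y == 1 with hP
  -- A's first loop: the pair of accumulators is a pair of filters
  have hsm : (pySingles full_list).1 = full_list.filter P := by
    unfold pySingles
    have hfun : (fun (p : List String × List String) y =>
        if P y then (p.1 ++ [y], p.2) else (p.1, p.2 ++ [y]))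
        = (fun (p : List String × List String) y =>
          ((fun acc y => if P y then acc ++ [y] else acc) p.1 y,
           (fun acc y => if P y then acc else acc ++ [y]) p.2 y)) := by
      funext p y; by_cases h : P y <;> simp [h]
    rw [hfun, PySem.List.foldl_prod_mk (f := fun acc y => if P y = true then acc ++ [y] else acc) (g := fun acc y => if P y = true then acc else acc ++ [y])]
    simp only
    rw [PySem.List.foldl_append_if_eq_filter]
    simp
  rw [hsm]
  set single := full_list.filter P with hsingle
  -- A is a map
  rw [pv_loopA_eq single (full_list.length - 0) full_list 0 rfl]
  simp only [List.take_zero, List.drop_zero, List.nil_append]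
  -- B's counter is a fold over the singles
  have hcounts : altCounts full_list
      = single.foldl (fun d cell => d.insert cell (d.getD cell 0 + 1)) PySem.Dict.empty := by
    unfold altCounts
    rw [hsingle, PySem.List.foldl_if_eq_foldl_filter]
  rw [hcounts]
  set counts : PySem.Dict String Int := single.foldl (fun d cell => d.insert cell (d.getD cell 0 + 1)) PySem.Dict.empty with hc
  -- B is a map
  have hB : full_list.foldl
      (fun out cell =>
        if P cell then out ++ [cell]
        else out ++ [String.ofList (cell.toList.foldl altScanStep (counts, [])).2]) []
      = full_list.map (fun cell =>
          if P cell then cell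
          else String.ofList (cell.toList.foldl altScanStep (counts, [])).2) := by
    have hfun2 : (fun (out : List String) cell =>
        if P cell then out ++ [cell]
        else out ++ [String.ofList (cell.toList.foldl altScanStep (counts, [])).2])
        = (fun (out : List String) cell => out ++ [(fun cell =>
            if P cell then cell
            else String.ofList (cell.toList.foldl altScanStep (counts, [])).2) cell]) := by
      funext out cell; by_cases h : P cell <;> simp [h]
    rw [hfun2, PySem.List.foldl_append_singleton_eq_map]
    simp
  rw [hB]
  -- pointwise
  apply List.map_congr_left
  intro x hx
  have hsl : ∀ y ∈ single, y.toList.length = 1 := by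
    intro y hy
    rw [hsingle] at hy
    have := (List.mem_filter.mp hy).2
    simpa [hP, PySem.Str.len_eq] using this
  by_cases hpx : P x
  · -- single cell: untouched on both sides
    have hmem : x ∈ single := by rw [hsingle]; exact List.mem_filter.mpr ⟨hx, hpx⟩
    rw [if_pos hpx]
    unfold pyStepCell
    rw [if_pos hmem]
  · rw [if_neg hpx]
    have hnmem : x ∉ single := fun hmem => hpx ((List.mem_filter.mp (hsingle ▸ hmem)).2)
    unfold pyStepCell
    rw [if_neg hnmem]
    apply String.toList_inj.mp
    rw [pv_foldl_stepChk single hsl x, remAll_eq_scanF]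
    rw [String.toList_ofList ..]
    rw [pv_scan_fold]
    simp only [List.nil_append]
    congr 1
    funext ch
    have hgd : counts.getD (String.ofList [ch]) 0 = (single.count (String.ofList [ch]) : Int) := by
      rw [hc, PySem.Dict.getD_foldl_insert_add_one]
      simp
    rw [hgd, ← pv_count_flatMap single hsl ch]


-- ===== VERDICT (by name: the statement is the Claim_ definition above) =====
theorem basic_check_spec : Claim_equal_basic_check := by
  intro full_list _
  exact pv_main full_list
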